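-- pv_equiv track=rewrite | github.com/chotchki/Quicksight-Generator | tests/audit/test_sql.py | _select_clause_top_level
-- ===== SOURCE A (Python) =====
-- def _select_clause_top_level(sql: str) -> str:
--     """Return the SELECT clause through the matching top-level FROM,
--     so subquery FROMs (depth > 0) don't truncate prematurely."""
--     depth = 0
--     upper = sql.upper()
--     i = 0
--     while i < len(sql):
--         c = sql[i]
--         if c == "(":
--             depth += 1
--         elif c == ")":
--             depth -= 1
--         elif depth == 0 and upper[i:i + 6] == " FROM ":
--             return sql[:i]
--         i += 1
--     return sql
-- ===== SOURCE B (Python) =====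
-- def _select_clause_top_level(sql: str) -> str:
--     """Return the SELECT clause through the matching top-level FROM,
--     so subquery FROMs (depth > 0) don't truncate prematurely."""
--     upper = sql.upper()
--     start = 0
--     while True:
--         idx = upper.find(" FROM ", start)
--         if idx == -1:
--             return sql
--         if sql[:idx].count("(") == sql[:idx].count(")"):
--             return sql[:idx]
--         start = idx + 1
-- ===== Notes on version B (the rewrite author's own statement) =====
-- stated objective: faster
-- what changed: Instead of a per-character scan maintaining a parenthesis depth counter, B jumps between candidate positions with str.find(' FROM ', start) and validates each candidate by comparing the '(' and ')' counts of the prefix, returning at the first balanced candidate.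
import Mathlib
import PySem

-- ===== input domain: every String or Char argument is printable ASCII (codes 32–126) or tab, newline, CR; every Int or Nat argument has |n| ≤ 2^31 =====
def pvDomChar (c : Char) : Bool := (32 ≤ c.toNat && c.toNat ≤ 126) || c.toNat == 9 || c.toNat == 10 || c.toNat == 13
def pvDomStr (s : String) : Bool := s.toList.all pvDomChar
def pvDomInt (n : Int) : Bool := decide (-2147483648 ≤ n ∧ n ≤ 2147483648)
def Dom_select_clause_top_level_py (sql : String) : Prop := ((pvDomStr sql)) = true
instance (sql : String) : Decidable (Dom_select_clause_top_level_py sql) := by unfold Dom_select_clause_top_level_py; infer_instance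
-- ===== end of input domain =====

-- B replaces A's per-character depth-tracking scan by candidate hops: find " FROM " from a moving
-- start index and validate each candidate by comparing '(' and ')' counts of the prefix (alternative
-- decomposition, same return value).


-- ===== PORT A =====
-- A's while loop: index i and a parenthesis depth counter; at depth 0 test the 6-char window
-- upper[i:i+6] against " FROM " and return sql[:i] on a hit.
-- (fuel = sql.length is a pure totality guard: each iteration advances i by 1.)
def selAGo (sql upper : List Char) : Nat → Nat → Int → List Char
  | 0, _, _ => sql
  | fuel + 1, i, depth =>
    if h : i < sql.length then
      if sql[i] = '(' then selAGo sql upper fuel (i + 1) (depth + 1)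
      else if sql[i] = ')' then selAGo sql upper fuel (i + 1) (depth - 1)
      else if depth = 0 ∧ PySem.List.slice upper (some (i : Int)) (some ((i : Int) + 6)) = (" FROM ").toList then
        PySem.List.slice sql none (some (i : Int))
      else selAGo sql upper fuel (i + 1) depth
    else sql

def select_clause_top_level_py (sql : String) : String :=
  String.mk (selAGo sql.toList (PySem.Chars.upper sql.toList) sql.toList.length 0 0)

-- ===== PORT B =====
-- B's while-True loop: idx = upper.find(" FROM ", start); -1 → return sql; balanced prefix
-- (equal '(' / ')' counts in sql[:idx]) → return sql[:idx]; else start = idx + 1.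
-- (fuel = sql.length is a pure totality guard: start strictly increases each iteration.)
def selBGo (sql upper : List Char) : Nat → Nat → List Char
  | 0, _ => sql
  | fuel + 1, start =>
    let idx := PySem.Chars.findFrom upper (" FROM ").toList (start : Int) none
    if idx = -1 then sql
    else
      let pre := PySem.List.slice sql none (some idx)
      if PySem.Chars.count pre ['('] = PySem.Chars.count pre [')'] then pre
      else selBGo sql upper fuel (idx.toNat + 1)

def select_clause_top_level_py_alt (sql : String) : String :=
  String.mk (selBGo sql.toList (PySem.Chars.upper sql.toList) sql.toList.length 0)

-- ===== PRECONDITION & SPEC =====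
def Spec_select_clause_top_level_py (sql : String) (out : String) : Prop := out = select_clause_top_level_py_alt sql
instance (sql : String) (out : String) : Decidable (Spec_select_clause_top_level_py sql out) := by unfold Spec_select_clause_top_level_py; infer_instance

-- ===== CLAIM (what is proved, stated in full; the proofs are below) =====
def Claim_equal_select_clause_top_level_py : Prop := ∀ (sql : String), Dom_select_clause_top_level_py sql → Spec_select_clause_top_level_py sql (select_clause_top_level_py sql)

-- ===== LEMMAS AND PROOFS =====

-- common characterisation: the first index j with a balanced prefix and " FROM " at j
def pvGood (sql upper : List Char) (j : Nat) : Bool :=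
  ((sql.take j).count '(' == (sql.take j).count ')') && decide ((" FROM ").toList <+: upper.drop j)

def pvSpecGo (sql upper : List Char) (i : Nat) : List Char :=
  match (List.range' i (sql.length - i)).find? (pvGood sql upper) with
  | none => sql
  | some j => sql.take j

lemma pvCount_go_singleton (c : Char) :
    ∀ (fuel : Nat) (l : List Char) (acc : Nat), l.length ≤ fuel →
      PySem.Chars.count.go [c] fuel l acc = acc + l.count c := by
  intro fuel
  induction fuel with
  | zero =>
    intro l acc hl
    have : l = [] := List.eq_nil_of_length_eq_zero (by omega)
    subst this; simp [PySem.Chars.count.go]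
  | succ n ih =>
    intro l acc hl
    cases l with
    | nil => simp [PySem.Chars.count.go]
    | cons a t =>
      rw [PySem.Chars.count.go]
      have hp : ([c].isPrefixOf (a :: t)) = (c == a) := by simp [List.isPrefixOf]
      rw [hp]
      by_cases hc : c = a
      · subst hc
        have hd : List.drop ([c] : List Char).length (c :: t) = t := by simp
        rw [if_pos (by simp), hd, ih t (acc + 1) (by simpa using Nat.le_of_succ_le_succ hl)]
        simp
        omega
      · rw [if_neg (by simpa using hc), ih t acc (by simpa using Nat.le_of_succ_le_succ hl)]
        simp [Ne.symm hc]

lemma pvCount_singleton (s : List Char) (c : Char) :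
    PySem.Chars.count s [c] = s.count c := by
  simp [PySem.Chars.count]
  simpa using pvCount_go_singleton c s.length s 0 le_rfl

-- " FROM " at j forces a space at j, so j is not a parenthesis position
lemma pvMatch_space (upper : List Char) (j : Nat)
    (h : (" FROM ").toList <+: upper.drop j) :
    upper[j]? = some ' ' := by
  obtain ⟨t, ht⟩ := h
  rw [show upper[j]? = (List.drop j upper)[0]? by simp [List.getElem?_drop], ← ht,
      show (" FROM ").toList = ' ' :: ("FROM ").toList from rfl]
  rfl


lemma pvUpper_map (sql : List Char) : PySem.Chars.upper sql = sql.map PySem.Chars.upperChar := rfl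

lemma pvGood_false_of_paren (sql : List Char) (i : Nat) (hi : i < sql.length)
    (hpar : sql[i] = '(' ∨ sql[i] = ')') :
    pvGood sql (PySem.Chars.upper sql) i = false := by
  unfold pvGood
  by_cases hm : (" FROM ").toList <+: (PySem.Chars.upper sql).drop i
  · exfalso
    have hs := pvMatch_space (PySem.Chars.upper sql) i hm
    rw [pvUpper_map] at hs
    simp only [List.getElem?_map, List.getElem?_eq_getElem hi, Option.map_some] at hs
    have hs' : PySem.Chars.upperChar sql[i] = ' ' := Option.some.inj hs
    rcases hpar with h | h <;> rw [h] at hs' <;> exact absurd hs' (by decide)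
  · rw [decide_eq_false hm, Bool.and_false]

lemma pvSlice_iff (U : List Char) (i : Nat) :
    (PySem.List.slice U (some (i : Int)) (some ((i : Int) + 6)) = (" FROM ").toList)
      ↔ (" FROM ").toList <+: U.drop i := by
  have h := PySem.List.slice_natCast_add U i 6
  rw [show ((6 : Nat) : Int) = (6 : Int) from by norm_num] at h
  rw [h]
  have hw : (" FROM ").toList.length = 6 := rfl
  constructor
  · intro he
    rw [List.prefix_iff_eq_take, hw, ← he]
  · intro hp
    have h2 := List.prefix_iff_eq_take.mp hp
    rw [hw] at h2
    exact h2.symm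

lemma pvTake_succ_count (sql : List Char) (i : Nat) (hi : i < sql.length) (c : Char) :
    (sql.take (i + 1)).count c = (sql.take i).count c + (if sql[i] = c then 1 else 0) := by
  rw [List.take_succ, List.getElem?_eq_getElem hi,
      show (some sql[i]).toList = [sql[i]] from rfl, List.count_append]
  rcases eq_or_ne sql[i] c with h | h
  · rw [h]; simp
  · have h' : ¬ c = sql[i] := fun e => h e.symm
    simp [List.count_cons, h, h']

lemma selAGo_eq_spec :
    ∀ (n : Nat) (sql : List Char) (i : Nat) (depth : Int),
      sql.length - i ≤ n →
      depth = ((sql.take i).count '(' : Int) - ((sql.take i).count ')' : Int) →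
      selAGo sql (PySem.Chars.upper sql) n i depth = pvSpecGo sql (PySem.Chars.upper sql) i := by
  intro n
  induction n with
  | zero =>
    intro sql i depth hn hd
    show sql = pvSpecGo sql (PySem.Chars.upper sql) i
    unfold pvSpecGo
    rw [show sql.length - i = 0 from by omega]
    rfl
  | succ n ih =>
    intro sql i depth hn hd
    rw [selAGo]
    by_cases hi : i < sql.length
    · have hspec : pvSpecGo sql (PySem.Chars.upper sql) i =
          if pvGood sql (PySem.Chars.upper sql) i then sql.take i
          else pvSpecGo sql (PySem.Chars.upper sql) (i + 1) := by
        unfold pvSpecGo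
        rw [show sql.length - i = (sql.length - (i + 1)) + 1 from by omega, List.range'_succ]
        by_cases hg : pvGood sql (PySem.Chars.upper sql) i
        · rw [List.find?_cons_of_pos hg, if_pos hg]
        · rw [List.find?_cons_of_neg (by simp [hg]), if_neg (by simp [hg])]
      rw [dif_pos hi]
      by_cases h1 : sql[i] = '('
      · rw [if_pos h1, hspec, if_neg (by simp [pvGood_false_of_paren sql i hi (Or.inl h1)])]
        refine ih sql (i + 1) (depth + 1) (by omega) ?_
        rw [pvTake_succ_count sql i hi '(', pvTake_succ_count sql i hi ')',
            if_pos h1, if_neg (by rw [h1]; decide)]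
        push_cast
        omega
      · rw [if_neg h1]
        by_cases h2 : sql[i] = ')'
        · rw [if_pos h2, hspec, if_neg (by simp [pvGood_false_of_paren sql i hi (Or.inr h2)])]
          refine ih sql (i + 1) (depth - 1) (by omega) ?_
          rw [pvTake_succ_count sql i hi '(', pvTake_succ_count sql i hi ')',
              if_neg (by rw [h2]; decide), if_pos h2]
          push_cast
          omega
        · rw [if_neg h2]
          by_cases h3 : depth = 0 ∧ PySem.List.slice (PySem.Chars.upper sql) (some (i : Int)) (some ((i : Int) + 6)) = (" FROM ").toList
          · have hg : pvGood sql (PySem.Chars.upper sql) i = true := by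
              unfold pvGood
              rw [Bool.and_eq_true]
              refine ⟨?_, decide_eq_true ((pvSlice_iff _ i).mp h3.2)⟩
              have hz := h3.1
              rw [hd] at hz
              simp only [beq_iff_eq]
              omega
            rw [if_pos h3, hspec, if_pos hg, PySem.List.slice_to sql (Int.natCast_nonneg i)]
            simp
          · have hg : pvGood sql (PySem.Chars.upper sql) i = false := by
              rw [Bool.eq_false_iff]
              intro hg
              unfold pvGood at hg
              rw [Bool.and_eq_true] at hg
              obtain ⟨hb, hm⟩ := hg
              refine h3 ⟨?_, (pvSlice_iff _ i).mpr (of_decide_eq_true hm)⟩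
              simp only [beq_iff_eq] at hb
              omega
            rw [if_neg h3, hspec, if_neg (by simp [hg])]
            refine ih sql (i + 1) depth (by omega) ?_
            rw [pvTake_succ_count sql i hi '(', pvTake_succ_count sql i hi ')',
                if_neg h1, if_neg h2]
            omega
    · rw [dif_neg hi]
      unfold pvSpecGo
      rw [show sql.length - i = 0 from by omega]
      rfl

lemma selBGo_eq_spec :
    ∀ (n : Nat) (sql : List Char) (start : Nat),
      start ≤ sql.length →
      sql.length - start ≤ n →
      selBGo sql (PySem.Chars.upper sql) n start = pvSpecGo sql (PySem.Chars.upper sql) start := by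
  have hlen : ∀ (sql : List Char), (PySem.Chars.upper sql).length = sql.length := by
    intro sql; rw [pvUpper_map]; exact List.length_map _
  intro n
  induction n with
  | zero =>
    intro sql start hs hn
    show sql = pvSpecGo sql (PySem.Chars.upper sql) start
    unfold pvSpecGo
    rw [show sql.length - start = 0 from by omega]
    rfl
  | succ n ih =>
    intro sql start hs hn
    rw [selBGo]
    by_cases hneg : PySem.Chars.findFrom (PySem.Chars.upper sql) (" FROM ").toList (start : Int) none = -1
    · rw [if_pos hneg]
      have hnm := (PySem.Chars.findFrom_natCast_eq_neg_one_iff (PySem.Chars.upper sql) (" FROM ").toList start (by rw [hlen]; omega)).mp hneg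
      unfold pvSpecGo
      rw [List.find?_eq_none.mpr ?_]
      intro x hx hg
      rw [List.mem_range'_1] at hx
      unfold pvGood at hg
      rw [Bool.and_eq_true] at hg
      have hm := of_decide_eq_true hg.2
      apply hnm
      rw [show (PySem.Chars.upper sql).drop x = ((PySem.Chars.upper sql).drop start).drop (x - start) from by rw [List.drop_drop]; congr 1; omega] at hm
      exact hm.isInfix.trans (List.drop_suffix _ _).isInfix
    · have hsp := PySem.Chars.findFrom_natCast_spec (PySem.Chars.upper sql) (" FROM ").toList start (by rw [hlen]; omega) hneg
      set idx := PySem.Chars.findFrom (PySem.Chars.upper sql) (" FROM ").toList (start : Int) none with hidx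
      have h0 : (0 : Int) ≤ idx := le_trans (Int.natCast_nonneg start) hsp.1
      have hk6 : idx.toNat + 6 ≤ sql.length := by
        have h6 := hsp.2.1.length_le
        rw [show (" FROM ").toList.length = 6 from rfl] at h6
        simp only [List.length_drop] at h6
        rw [hlen] at h6
        omega
      have hkge : start ≤ idx.toNat := by
        have h1 := hsp.1
        omega
      rw [if_neg hneg]
      have hpre : PySem.List.slice sql none (some idx) = sql.take idx.toNat :=
        PySem.List.slice_to sql h0
      have hmid : List.find? (pvGood sql (PySem.Chars.upper sql)) (List.range' start (idx.toNat - start)) = none := by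
        rw [List.find?_eq_none]
        intro x hx hg
        rw [List.mem_range'_1] at hx
        unfold pvGood at hg
        rw [Bool.and_eq_true] at hg
        have hm := of_decide_eq_true hg.2
        exact hsp.2.2 x hx.1 (by omega) hm
      have hsplit : List.range' start (sql.length - start) =
          List.range' start (idx.toNat - start) ++ List.range' idx.toNat (sql.length - idx.toNat) := by
        have h := @List.range'_append start (idx.toNat - start) (sql.length - idx.toNat) 1
        rw [show start + 1 * (idx.toNat - start) = idx.toNat from by omega,
            show (idx.toNat - start) + (sql.length - idx.toNat) = sql.length - start from by omega] at h
        exact h.symm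
      by_cases hb2 : PySem.Chars.count (PySem.List.slice sql none (some idx)) ['('] = PySem.Chars.count (PySem.List.slice sql none (some idx)) [')']
      · have hbc := hb2
        rw [hpre, pvCount_singleton, pvCount_singleton] at hbc
        have hg : pvGood sql (PySem.Chars.upper sql) idx.toNat = true := by
          unfold pvGood
          rw [Bool.and_eq_true]
          exact ⟨by simp only [beq_iff_eq]; omega, decide_eq_true hsp.2.1⟩
        rw [if_pos hb2, hpre]
        unfold pvSpecGo
        rw [hsplit, List.find?_append, hmid, Option.none_or,
            show sql.length - idx.toNat = (sql.length - (idx.toNat + 1)) + 1 from by omega,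
            List.range'_succ, List.find?_cons_of_pos hg]
      · have hbc := hb2
        rw [hpre, pvCount_singleton, pvCount_singleton] at hbc
        have hg : pvGood sql (PySem.Chars.upper sql) idx.toNat = false := by
          rw [Bool.eq_false_iff]
          intro hg
          unfold pvGood at hg
          rw [Bool.and_eq_true] at hg
          have hbe := hg.1
          simp only [beq_iff_eq] at hbe
          exact hbc hbe
        rw [if_neg hb2]
        rw [ih sql (idx.toNat + 1) (by omega) (by omega)]
        unfold pvSpecGo
        rw [hsplit, List.find?_append, hmid, Option.none_or,
            show sql.length - idx.toNat = (sql.length - (idx.toNat + 1)) + 1 from by omega,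
            List.range'_succ, List.find?_cons_of_neg (by simp [hg])]

-- ===== VERDICT (by name: the statement is the Claim_ definition above) =====
theorem select_clause_top_level_py_spec : Claim_equal_select_clause_top_level_py := by
  intro sql _
  unfold Spec_select_clause_top_level_py select_clause_top_level_py select_clause_top_level_py_alt
  rw [selAGo_eq_spec sql.toList.length sql.toList 0 0 (by omega) (by simp),
      selBGo_eq_spec sql.toList.length sql.toList 0 (by omega) (by omega)]
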